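-- pv_equiv track=rewrite | github.com/bravojuandb/python-daily-drills | pillar1/5_iteration_sequence_tricks/stop_sized_slicing.py | step_slice
-- ===== SOURCE A (Python) =====
-- def step_slice(nums: list[int]) -> tuple[list[int], list[int]]:
--
--     every_2nd = []
--     for i in range(0, len(nums), 2):
--         every_2nd.append(nums[i])
--
--     every_3rd = []
--     for i in range(0, len(nums) - 1, 3):
--         every_3rd.append(nums[i])
--
--     return every_2nd, every_3rd
-- ===== SOURCE B (Python) =====
-- def step_slice(nums: list[int]) -> tuple[list[int], list[int]]:
--     n = len(nums)
--     every_2nd = []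
--     every_3rd = []
--     for i, x in enumerate(nums):
--         if i % 2 == 0:
--             every_2nd.append(x)
--         if i % 3 == 0 and i < n - 1:
--             every_3rd.append(x)
--     return every_2nd, every_3rd
-- ===== Notes on version B (the rewrite author's own statement) =====
-- stated objective: alternative
-- what changed: Two separate stride loops over range(0,n,2) and range(0,n-1,3) are fused into a single enumerate pass that tests i % 2 == 0 and (i % 3 == 0 and i < n - 1) while maintaining both output lists at once.
import Mathlib
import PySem

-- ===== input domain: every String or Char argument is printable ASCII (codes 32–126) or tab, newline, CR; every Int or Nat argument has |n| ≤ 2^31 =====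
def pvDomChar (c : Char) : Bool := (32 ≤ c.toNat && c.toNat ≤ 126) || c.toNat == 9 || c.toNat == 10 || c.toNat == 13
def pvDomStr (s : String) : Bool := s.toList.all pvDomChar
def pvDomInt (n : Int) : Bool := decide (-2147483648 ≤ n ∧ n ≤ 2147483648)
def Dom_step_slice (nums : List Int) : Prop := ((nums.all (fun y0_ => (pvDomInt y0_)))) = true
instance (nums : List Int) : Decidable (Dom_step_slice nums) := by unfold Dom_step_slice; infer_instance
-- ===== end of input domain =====

-- B fuses A's two stride loops into one enumerate pass with two accumulators; same O(n) cost (objective: alternative).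

-- ===== PORT A =====
def step_slice (nums : List Int) : List Int × List Int :=
  let every_2nd :=
    (PySem.List.pyRange 0 (PySem.List.len nums) 2).foldl
      (fun acc i => acc ++ [PySem.List.pyGetD nums i 0]) []
  let every_3rd :=
    (PySem.List.pyRange 0 (PySem.List.len nums - 1) 3).foldl
      (fun acc i => acc ++ [PySem.List.pyGetD nums i 0]) []
  (every_2nd, every_3rd)

-- ===== PORT B =====
def step_slice_alt (nums : List Int) : List Int × List Int :=
  let n : Int := PySem.List.len nums
  (PySem.List.enumerate nums).foldl
    (fun acc p =>
      (if PySem.Int.mod p.1 2 == 0 then acc.1 ++ [p.2] else acc.1,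
       if PySem.Int.mod p.1 3 == 0 && decide (p.1 < n - 1) then acc.2 ++ [p.2] else acc.2))
    ([], [])

-- ===== PRECONDITION & SPEC =====
def Spec_step_slice (nums : List Int) (out : List Int × List Int) : Prop := out = step_slice_alt nums
instance (nums : List Int) (out : List Int × List Int) : Decidable (Spec_step_slice nums out) := by unfold Spec_step_slice; infer_instance

-- ===== CLAIM (what is proved, stated in full; the proofs are below) =====
def Claim_equal_step_slice : Prop := ∀ (nums : List Int), Dom_step_slice nums → Spec_step_slice nums (step_slice nums)

-- ===== LEMMAS AND PROOFS =====

-- a stride-s range is strictly increasing (s > 0)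
theorem pairwise_lt_pyRange_pos (a b s : Int) (hs : 0 < s) :
    (PySem.List.pyRange a b s).Pairwise (· < ·) := by
  rw [PySem.List.pyRange_of_pos a b hs]
  rw [List.pairwise_map]
  exact List.pairwise_lt_range.imp (fun {i j} h => by nlinarith)

-- range(0, b, 2) is range(0, b)'s multiples of 2
theorem pyRange_two_eq_filter (b : Int) :
    PySem.List.pyRange 0 b 2
      = (PySem.List.pyRange 0 b 1).filter (fun i => PySem.Int.mod i 2 == 0) := by
  have h1 : (PySem.List.pyRange 0 b 2).Pairwise (· < ·) :=
    pairwise_lt_pyRange_pos 0 b 2 (by norm_num)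
  have h2 : ((PySem.List.pyRange 0 b 1).filter (fun i => PySem.Int.mod i 2 == 0)).Pairwise (· < ·) :=
    (PySem.List.pairwise_lt_pyRange_one 0 b).filter _
  refine List.Perm.eq_of_pairwise (le := (· < ·)) (fun a b _ _ hab hba => absurd hba (by omega)) h1 h2 ?_
  rw [List.perm_ext_iff_of_nodup (h1.imp ne_of_lt) (h2.imp ne_of_lt)]
  intro x
  simp only [List.mem_filter, PySem.List.mem_pyRange_iff_of_pos (by norm_num : (0:Int) < 2),
    PySem.List.mem_pyRange_one, beq_iff_eq, PySem.Int.mod_eq_zero_iff_dvd]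
  omega

-- range(0, b-1, 3) is range(0, b)'s multiples of 3 below b-1
theorem pyRange_three_eq_filter (b : Int) :
    PySem.List.pyRange 0 (b - 1) 3
      = (PySem.List.pyRange 0 b 1).filter
          (fun i => PySem.Int.mod i 3 == 0 && decide (i < b - 1)) := by
  have h1 : (PySem.List.pyRange 0 (b - 1) 3).Pairwise (· < ·) :=
    pairwise_lt_pyRange_pos 0 (b - 1) 3 (by norm_num)
  have h2 : ((PySem.List.pyRange 0 b 1).filter
      (fun i => PySem.Int.mod i 3 == 0 && decide (i < b - 1))).Pairwise (· < ·) :=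
    (PySem.List.pairwise_lt_pyRange_one 0 b).filter _
  refine List.Perm.eq_of_pairwise (le := (· < ·)) (fun a b _ _ hab hba => absurd hba (by omega)) h1 h2 ?_
  rw [List.perm_ext_iff_of_nodup (h1.imp ne_of_lt) (h2.imp ne_of_lt)]
  intro x
  simp only [List.mem_filter, PySem.List.mem_pyRange_iff_of_pos (by norm_num : (0:Int) < 3),
    PySem.List.mem_pyRange_one, Bool.and_eq_true, beq_iff_eq, decide_eq_true_eq,
    PySem.Int.mod_eq_zero_iff_dvd]
  omega

theorem step_slice_eq_alt (nums : List Int) : step_slice nums = step_slice_alt nums := by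
  unfold step_slice step_slice_alt
  rw [PySem.List.enumerate_eq_map_pyRange nums 0, List.foldl_map]
  rw [PySem.List.foldl_prod_mk
    (f := fun acc (j : Int) => if PySem.Int.mod j 2 == 0 then acc ++ [PySem.List.pyGetD nums j 0] else acc)
    (g := fun acc (j : Int) => if PySem.Int.mod j 3 == 0 && decide (j < PySem.List.len nums - 1)
            then acc ++ [PySem.List.pyGetD nums j 0] else acc)]
  rw [PySem.List.foldl_append_if, PySem.List.foldl_append_if,
    PySem.List.foldl_append_singleton_eq_map, PySem.List.foldl_append_singleton_eq_map]
  rw [pyRange_two_eq_filter (PySem.List.len nums),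
    pyRange_three_eq_filter (PySem.List.len nums)]

-- ===== VERDICT (by name: the statement is the Claim_ definition above) =====
theorem step_slice_spec : Claim_equal_step_slice := by
  intro nums _
  unfold Spec_step_slice
  exact step_slice_eq_alt nums
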